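-- pv_equiv track=rewrite | github.com/nhittt/Compression-Fi2015 | features.py | getContext6_7
-- ===== SOURCE A (Python) =====
-- def getContext6_7(n, m, edges_dict):
-- 	context=[]
-- 	count_n=0
-- 	count_m=0
-- 	for item in edges_dict.keys():
-- 		if item[0] == n:
-- 			count_n+=1
-- 		if item[0] == m:
-- 			count_m+=1
-- 	context.append('Num_children_n=' + str(count_n))
-- 	context.append('Num_children_m=' + str(count_m))
-- 	return context
-- ===== SOURCE B (Python) =====
-- def getContext6_7(n, m, edges_dict):
--     srcs = [item[0] for item in edges_dict.keys()]
--     return ['Num_children_n=' + str(srcs.count(n)),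
--             'Num_children_m=' + str(srcs.count(m))]
-- ===== Notes on version B (the rewrite author's own statement) =====
-- stated objective: idiomatic
-- what changed: B replaces A's single fused loop with two scalar branch-and-increment counters by staged passes: it first extracts the list of source nodes, then obtains each count with a separate list.count pass.
import Mathlib
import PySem

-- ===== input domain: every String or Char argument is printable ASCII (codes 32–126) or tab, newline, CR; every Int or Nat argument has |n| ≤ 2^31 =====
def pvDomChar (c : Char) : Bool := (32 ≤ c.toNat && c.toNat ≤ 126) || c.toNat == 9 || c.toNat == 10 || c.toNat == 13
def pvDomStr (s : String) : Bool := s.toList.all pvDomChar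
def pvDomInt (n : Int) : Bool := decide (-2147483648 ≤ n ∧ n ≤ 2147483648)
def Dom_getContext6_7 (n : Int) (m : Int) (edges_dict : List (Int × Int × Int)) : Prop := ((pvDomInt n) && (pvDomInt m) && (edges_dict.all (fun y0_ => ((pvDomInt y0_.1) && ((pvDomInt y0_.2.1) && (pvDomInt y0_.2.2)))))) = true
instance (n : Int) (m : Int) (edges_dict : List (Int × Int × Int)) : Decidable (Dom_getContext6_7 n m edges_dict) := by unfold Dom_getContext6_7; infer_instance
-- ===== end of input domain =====

-- B: staged passes — extract the source-node list once, then two list.count passes (idiomatic rewrite, same cost).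
-- ===== PORT A =====
def getContext6_7 (n : Int) (m : Int) (edges_dict : List (Int × Int × Int)) : List String :=
  let counts := edges_dict.foldl
    (fun (c : Int × Int) item =>
      let c1 := if item.1 = n then c.1 + 1 else c.1
      let c2 := if item.1 = m then c.2 + 1 else c.2
      (c1, c2)) (0, 0)
  ["Num_children_n=" ++ PySem.Int.toStr counts.1,
   "Num_children_m=" ++ PySem.Int.toStr counts.2]

-- ===== PORT B =====
def getContext6_7_alt (n : Int) (m : Int) (edges_dict : List (Int × Int × Int)) : List String :=
  let srcs := edges_dict.map (·.1)
  ["Num_children_n=" ++ PySem.Int.toStr (PySem.List.count srcs n),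
   "Num_children_m=" ++ PySem.Int.toStr (PySem.List.count srcs m)]

-- ===== PRECONDITION & SPEC =====
def Spec_getContext6_7 (n : Int) (m : Int) (edges_dict : List (Int × Int × Int)) (out : List String) : Prop := out = getContext6_7_alt n m edges_dict
instance (n : Int) (m : Int) (edges_dict : List (Int × Int × Int)) (out : List String) : Decidable (Spec_getContext6_7 n m edges_dict out) := by unfold Spec_getContext6_7; infer_instance

-- ===== CLAIM =====
def Claim_equal_getContext6_7 : Prop := ∀ (n : Int) (m : Int) (edges_dict : List (Int × Int × Int)), Dom_getContext6_7 n m edges_dict → Spec_getContext6_7 n m edges_dict (getContext6_7 n m edges_dict)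

-- ===== LEMMAS AND PROOFS =====
theorem countA (n m : Int) (xs : List (Int × Int × Int)) (c : Int × Int) :
    xs.foldl (fun (c : Int × Int) item =>
      let c1 := if item.1 = n then c.1 + 1 else c.1
      let c2 := if item.1 = m then c.2 + 1 else c.2
      (c1, c2)) c
    = (c.1 + ((xs.map (·.1)).count n : Int), c.2 + ((xs.map (·.1)).count m : Int)) := by
  induction xs generalizing c with
  | nil => simp
  | cons x xs ih =>
    simp only [List.foldl_cons, ih, List.map_cons, List.count_cons]
    rw [Prod.mk.injEq]
    constructor <;>
      (by_cases hn : x.1 = n <;> by_cases hm : x.1 = m <;> simp [hn, hm] <;> omega)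

-- ===== VERDICT =====
theorem getContext6_7_spec : Claim_equal_getContext6_7 := by
  intro n m edges_dict _
  unfold Spec_getContext6_7 getContext6_7 getContext6_7_alt
  simp only [countA, PySem.List.count_eq, Int.zero_add]
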